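-- pv_equiv track=rewrite | github.com/lFelixC/dreamzero | video_eval/common.py | build_chunk_schedule
-- ===== SOURCE A (Python) =====
-- RELATIVE_OFFSETS = (-23, -16, -8, 0)
--
-- ACTION_HORIZON = 24
--
-- def build_chunk_schedule(total_frames: int, num_chunks: int | None = None) -> list[list[int]]:
--     """Build the frame schedule used by the official DreamZero test client."""
--     chunks: list[list[int]] = []
--     current_frame = 23
--     while True:
--         if num_chunks is not None and len(chunks) >= num_chunks:
--             break
--         indices = [max(current_frame + off, 0) for off in RELATIVE_OFFSETS]
--         if indices[-1] >= total_frames: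
--             break
--         chunks.append(indices)
--         current_frame += ACTION_HORIZON
--     return chunks
-- ===== SOURCE B (Python) =====
-- RELATIVE_OFFSETS = (-23, -16, -8, 0)
--
-- ACTION_HORIZON = 24
--
-- def build_chunk_schedule(total_frames: int, num_chunks: int | None = None) -> list[list[int]]:
--     """Closed-form chunk count + bounded comprehension instead of a stateful while-loop."""
--     n = max(0, -(-(total_frames - 23) // ACTION_HORIZON))
--     if num_chunks is not None:
--         n = min(n, max(num_chunks, 0))
--     return [[max(23 + ACTION_HORIZON * i + off, 0) for off in RELATIVE_OFFSETS]
--             for i in range(n)]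
-- ===== Notes on version B (the rewrite author's own statement) =====
-- stated objective: simpler
-- what changed: Replaces A's stateful while-True loop with breaks by a closed-form ceiling-division chunk count (clamped by num_chunks) followed by a bounded range comprehension.
import Mathlib
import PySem

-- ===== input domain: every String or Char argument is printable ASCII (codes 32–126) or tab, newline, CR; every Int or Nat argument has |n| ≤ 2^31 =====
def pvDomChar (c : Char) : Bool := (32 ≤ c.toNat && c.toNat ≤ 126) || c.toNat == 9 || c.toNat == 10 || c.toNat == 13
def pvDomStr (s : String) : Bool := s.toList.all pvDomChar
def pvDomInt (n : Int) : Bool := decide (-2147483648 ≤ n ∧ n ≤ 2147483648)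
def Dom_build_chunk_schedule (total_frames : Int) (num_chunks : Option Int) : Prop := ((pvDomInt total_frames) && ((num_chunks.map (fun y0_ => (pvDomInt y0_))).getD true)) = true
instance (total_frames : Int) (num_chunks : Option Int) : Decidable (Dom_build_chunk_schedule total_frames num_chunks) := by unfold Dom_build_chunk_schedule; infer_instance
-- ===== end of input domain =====

-- B replaces A's stateful while-True loop by a closed-form chunk count and a range comprehension (same values; alternative decomposition).

-- ===== PORT A =====
def RELATIVE_OFFSETS : List Int := [-23, -16, -8, 0]

def ACTION_HORIZON : Int := 24

-- A's `while True` loop, step for step; `indices[-1]` is read with pyGet? (the list is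
-- nonempty, so `.getD 0` never supplies the default and the read is exact).
def buildLoop (total_frames : Int) (num_chunks : Option Int)
    (chunks : List (List Int)) (current_frame : Int) : List (List Int) :=
  if num_chunks.any (fun n => decide ((chunks.length : Int) ≥ n)) then chunks
  else
    let indices := RELATIVE_OFFSETS.map (fun off => max (current_frame + off) 0)
    if (PySem.List.pyGet? indices (-1)).getD 0 ≥ total_frames then chunks
    else buildLoop total_frames num_chunks (chunks ++ [indices]) (current_frame + ACTION_HORIZON)
termination_by (total_frames - current_frame).toNat
decreasing_by
  simp [indices, RELATIVE_OFFSETS, ACTION_HORIZON, PySem.List.pyGet?, PySem.List.pyIdx?] at *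
  omega

def build_chunk_schedule (total_frames : Int) (num_chunks : Option Int) : List (List Int) :=
  buildLoop total_frames num_chunks [] 23

-- ===== PORT B =====
def build_chunk_schedule_alt (total_frames : Int) (num_chunks : Option Int) : List (List Int) :=
  let n0 := max 0 (-(PySem.Int.floordiv (-(total_frames - 23)) ACTION_HORIZON))
  let n := match num_chunks with
    | some k => min n0 (max k 0)
    | none => n0
  (PySem.List.pyRange 0 n 1).map
    (fun i => RELATIVE_OFFSETS.map (fun off => max (23 + ACTION_HORIZON * i + off) 0))

-- ===== PRECONDITION & SPEC =====
def Spec_build_chunk_schedule (total_frames : Int) (num_chunks : Option Int) (out : List (List Int)) : Prop := out = build_chunk_schedule_alt total_frames num_chunks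
instance (total_frames : Int) (num_chunks : Option Int) (out : List (List Int)) : Decidable (Spec_build_chunk_schedule total_frames num_chunks out) := by unfold Spec_build_chunk_schedule; infer_instance

-- ===== CLAIM (what is proved, stated in full; the proofs are below) =====
def Claim_equal_build_chunk_schedule : Prop := ∀ (total_frames : Int) (num_chunks : Option Int), Dom_build_chunk_schedule total_frames num_chunks → Spec_build_chunk_schedule total_frames num_chunks (build_chunk_schedule total_frames num_chunks)

-- ===== LEMMAS AND PROOFS =====
def chunkAt (i : Int) : List Int :=
  RELATIVE_OFFSETS.map (fun off => max (23 + ACTION_HORIZON * i + off) 0)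

def nTarget (total_frames : Int) (num_chunks : Option Int) : Int :=
  let n0 := max 0 (-(PySem.Int.floordiv (-(total_frames - 23)) 24))
  match num_chunks with
  | some k => min n0 (max k 0)
  | none => n0

lemma ceil_bracket (tf : Int) :
    ∀ k : Int, (23 + 24 * k ≥ tf) ↔ k ≥ -(PySem.Int.floordiv (-(tf - 23)) 24) := by
  intro k
  have h1 := PySem.Int.floordiv_mul_add_mod (-(tf - 23)) 24
  have h2 := PySem.Int.mod_nonneg (-(tf - 23)) (b := 24) (by norm_num)
  have h3 := PySem.Int.mod_lt (-(tf - 23)) (b := 24) (by norm_num)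
  omega

lemma last_index_eq (k : Int) :
    (PySem.List.pyGet? (List.map (fun off => max (23 + 24 * k + off) 0) RELATIVE_OFFSETS) (-1)).getD 0
      = max (23 + 24 * k) 0 := by
  simp [RELATIVE_OFFSETS, PySem.List.pyGet?, PySem.List.pyIdx?]

lemma loop_main (tf : Int) (nc : Option Int) :
    ∀ (m k : Nat) (acc : List (List Int)),
      m = (nTarget tf nc).toNat - k → acc.length = k →
      buildLoop tf nc acc (23 + 24 * (k : Int)) =
        acc ++ (List.range ((nTarget tf nc).toNat - k)).map
          (fun (j : Nat) => chunkAt ((k : Int) + (j : Int))) := by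
  intro m
  induction m with
  | zero =>
    intro k acc hm hacc
    have hstop : (nTarget tf nc).toNat ≤ k := by omega
    have hNk : (nTarget tf nc).toNat - k = 0 := by omega
    have hbr := ceil_bracket tf (k : Int)
    rw [hNk]
    simp only [List.range_zero, List.map_nil, List.append_nil]
    unfold buildLoop
    dsimp only
    rcases hnc : nc with _ | c
    · subst hnc
      simp only [nTarget] at hstop
      simp only [Option.any_none, Bool.false_eq_true, if_false]
      rw [if_pos (by rw [last_index_eq]; omega)]
    · subst hnc
      simp only [nTarget] at hstop
      by_cases hge : (k : Int) ≥ c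
      · rw [if_pos (by simp [hacc, hge])]
      · rw [if_neg (by simp [hacc]; omega), if_pos (by rw [last_index_eq]; omega)]
  | succ m ih =>
    intro k acc hm hacc
    have hklt : k < (nTarget tf nc).toNat := by omega
    have hbr := ceil_bracket tf (k : Int)
    have hfirst : nc.any (fun n => decide ((acc.length : Int) ≥ n)) = false := by
      rcases hnc : nc with _ | c
      · rfl
      · subst hnc
        simp only [nTarget] at hklt
        simp only [Option.any_some, hacc, decide_eq_false_iff_not]
        omega
    have hsecond : ¬ ((PySem.List.pyGet? (List.map (fun off => max (23 + 24 * (k : Int) + off) 0) RELATIVE_OFFSETS) (-1)).getD 0 ≥ tf) := by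
      rw [last_index_eq]
      have : ¬ (23 + 24 * (k : Int) ≥ tf) := by
        rw [hbr]
        rcases hnc : nc with _ | c <;> subst hnc <;> simp only [nTarget] at hklt <;> omega
      omega
    unfold buildLoop
    dsimp only
    rw [hfirst]
    simp only [Bool.false_eq_true, if_false]
    rw [if_neg hsecond]
    have hstep : (23 + 24 * (k : Int)) + ACTION_HORIZON = 23 + 24 * ((k + 1 : Nat) : Int) := by
      simp [ACTION_HORIZON]; ring
    rw [hstep, ih (k + 1) _ (by omega) (by simp [hacc])]
    have hchunk : List.map (fun off => max (23 + 24 * (k : Int) + off) 0) RELATIVE_OFFSETS = chunkAt (k : Int) := by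
      simp [chunkAt, ACTION_HORIZON, RELATIVE_OFFSETS]
    have hrange : (nTarget tf nc).toNat - k = ((nTarget tf nc).toNat - (k + 1)) + 1 := by omega
    rw [hchunk, hrange, List.range_succ_eq_map, List.map_cons, List.map_map, List.append_assoc]
    congr 1
    simp only [List.singleton_append, Nat.cast_zero, add_zero, List.cons.injEq]
    refine ⟨trivial, List.map_congr_left ?_⟩
    intro j _
    simp only [Function.comp]
    congr 1
    push_cast; ring

-- ===== VERDICT (by name: the statement is the Claim_ definition above) =====
theorem build_chunk_schedule_spec : Claim_equal_build_chunk_schedule := by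
  intro tf nc _
  unfold Spec_build_chunk_schedule build_chunk_schedule
  have h0 : (23 : Int) = 23 + 24 * ((0 : Nat) : Int) := by norm_num
  rw [h0, loop_main tf nc ((nTarget tf nc).toNat - 0) 0 [] rfl rfl]
  simp only [List.nil_append, Nat.sub_zero]
  unfold build_chunk_schedule_alt nTarget
  dsimp only
  rcases nc with _ | c <;>
  · rw [PySem.List.pyRange_one]
    simp [chunkAt, RELATIVE_OFFSETS, ACTION_HORIZON, List.map_map, Function.comp]
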